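-- pv_equiv track=rewrite | github.com/dashton956-alt/POC | example-orchestrator/workflows/tasks/device_types.py | create_manufacturer_slug
-- ===== SOURCE A (Python) =====
-- def create_manufacturer_slug(manufacturer_name: str) -> str:
--     """Create NetBox-compatible slug from manufacturer name."""
--     slug = manufacturer_name.lower()
--     slug = slug.replace(' ', '-')
--     slug = slug.replace('&', 'and')
--     slug = slug.replace('.', '')
--     slug = slug.replace(',', '')
--     slug = slug.replace('(', '')
--     slug = slug.replace(')', '')
--     slug = slug.replace('/', '-')
--     slug = slug.replace('\\', '-')
--
--     # Remove multiple consecutive hyphens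
--     while '--' in slug:
--         slug = slug.replace('--', '-')
--
--     # Remove leading/trailing hyphens
--     slug = slug.strip('-')
--
--     return slug
-- ===== SOURCE B (Python) =====
-- def _mapped(ch):
--     if ch in ' /\\':
--         return '-'
--     if ch == '&':
--         return 'and'
--     if ch in '.,()':
--         return ''
--     return ch
--
--
-- def create_manufacturer_slug(manufacturer_name: str) -> str:
--     """Create NetBox-compatible slug from manufacturer name."""
--     out = []
--     for ch in manufacturer_name.lower():
--         for c in _mapped(ch):
--             # collapse hyphens on the fly: never emit '-' right after '-'
--             if c == '-' and out and out[-1] == '-':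
--                 continue
--             out.append(c)
--     return ''.join(out).strip('-')
-- ===== Notes on version B (the rewrite author's own statement) =====
-- stated objective: simpler
-- what changed: Replaced the eight whole-string replace passes plus a fixpoint while-loop that collapses repeated hyphens with a single character-at-a-time pass that maps each character and skips a hyphen whenever the last emitted character is already a hyphen.
import Mathlib
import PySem

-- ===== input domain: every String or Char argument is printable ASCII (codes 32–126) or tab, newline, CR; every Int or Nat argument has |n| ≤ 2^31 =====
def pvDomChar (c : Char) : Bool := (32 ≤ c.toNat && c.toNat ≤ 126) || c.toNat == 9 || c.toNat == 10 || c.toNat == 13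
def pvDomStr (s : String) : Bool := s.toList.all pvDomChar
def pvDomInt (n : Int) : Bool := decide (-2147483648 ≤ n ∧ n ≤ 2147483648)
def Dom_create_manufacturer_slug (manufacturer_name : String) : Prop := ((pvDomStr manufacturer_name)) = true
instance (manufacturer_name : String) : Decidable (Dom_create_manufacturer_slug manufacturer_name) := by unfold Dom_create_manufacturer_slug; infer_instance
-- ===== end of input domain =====

-- B replaces A's eight whole-string replace passes and the '--' fixpoint while-loop by one
-- character-at-a-time pass with an inline hyphen-collapse (objective: simpler, single pass).

-- ===== PORT A =====
-- Helpers used by port A's while-loop for its termination proof (cited in decreasing_by):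
-- pvStep is one pass of str.replace('--','-') on a char list, pvDD is ('--' in s).
def pvStep : List Char → List Char
  | [] => []
  | [c] => [c]
  | c :: d :: t => if c = '-' ∧ d = '-' then '-' :: pvStep t else c :: pvStep (d :: t)

def pvDD : List Char → Bool
  | [] => false
  | [_] => false
  | c :: d :: t => (decide (c = '-' ∧ d = '-')) || pvDD (d :: t)

theorem pvGo_dd :
    ∀ (fuel : Nat) (l acc : List Char), l.length ≤ fuel →
      PySem.Chars.replace.go ['-', '-'] ['-'] fuel l acc = acc.reverse ++ pvStep l := by
  intro fuel
  induction fuel with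
  | zero =>
    intro l acc h
    have : l = [] := by cases l <;> simp_all
    subst this
    simp [PySem.Chars.replace.go, pvStep]
  | succ n ih =>
    intro l acc h
    match l with
    | [] => simp [PySem.Chars.replace.go, pvStep]
    | [c] =>
      cases n with
      | zero => simp [PySem.Chars.replace.go, pvStep, List.isPrefixOf]
      | succ m => simp [PySem.Chars.replace.go, pvStep, List.isPrefixOf]
    | c :: d :: t =>
      by_cases hcd : c = '-' ∧ d = '-'
      · obtain ⟨hc, hd⟩ := hcd
        subst hc; subst hd
        have hlen : t.length ≤ n := by simp at h; omega
        simp [PySem.Chars.replace.go, List.isPrefixOf, ih t ('-' :: acc) hlen, pvStep]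
      · have hpre : List.isPrefixOf ['-','-'] (c :: d :: t) = false := by
          simp [List.isPrefixOf]
          intro h1 h2
          exact hcd ⟨h1.symm, h2.symm⟩
        have hlen : (d :: t).length ≤ n := by simp at h ⊢; omega
        simp [PySem.Chars.replace.go, hpre, ih (d :: t) (c :: acc) hlen, pvStep, hcd]

theorem pvReplace_dd (l : List Char) :
    PySem.Chars.replace l ['-','-'] ['-'] = pvStep l := by
  simp [PySem.Chars.replace, pvGo_dd l.length l [] le_rfl]

theorem pvStep_length_le : ∀ l : List Char, (pvStep l).length ≤ l.length := by
  intro l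
  induction l using pvStep.induct with
  | case1 => simp [pvStep]
  | case2 c => simp [pvStep]
  | case3 c d t h ih => simp only [pvStep, if_pos h, List.length_cons]; omega
  | case4 c d t h ih =>
    have := ih
    simp only [pvStep, if_neg h, List.length_cons] at *
    omega

theorem pvStep_length_lt : ∀ l : List Char, pvDD l = true → (pvStep l).length < l.length := by
  intro l
  induction l using pvStep.induct with
  | case1 => simp [pvDD]
  | case2 c => simp [pvDD]
  | case3 c d t h ih =>
    intro _
    have := pvStep_length_le t
    simp only [pvStep, if_pos h, List.length_cons]
    omega
  | case4 c d t h ih =>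
    intro hdd
    have hdd' : pvDD (d :: t) = true := by
      simp only [pvDD, Bool.or_eq_true, decide_eq_true_eq] at hdd
      rcases hdd with h1 | h2
      · exact absurd h1 h
      · exact h2
    have := ih hdd'
    simp only [pvStep, if_neg h, List.length_cons] at *
    omega

theorem pvDD_iff_infix : ∀ l : List Char, pvDD l = true ↔ ['-','-'] <:+: l := by
  intro l
  induction l using pvDD.induct with
  | case1 => simp [pvDD]
  | case2 c => simp [pvDD]; intro h; have := h.length_le; simp at this
  | case3 c d t ih =>
    simp only [pvDD, Bool.or_eq_true, decide_eq_true_eq, ih]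
    constructor
    · rintro (⟨hc, hd⟩ | h)
      · subst hc; subst hd; exact ⟨[], t, rfl⟩
      · exact List.infix_cons_iff.mpr (Or.inr h)
    · intro h
      rcases List.infix_cons_iff.mp h with hp | h2
      · rcases List.cons_prefix_cons.mp hp with ⟨hc, h2⟩
        rcases List.cons_prefix_cons.mp h2 with ⟨hd, _⟩
        exact Or.inl ⟨hc.symm, hd.symm⟩
      · exact Or.inr h2

theorem pvIsIn_eq_pvDD (l : List Char) : PySem.Chars.isIn ['-','-'] l = pvDD l := by
  rcases h : pvDD l with _ | _
  · rw [PySem.Chars.isIn_eq_false_iff]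
    intro hin
    rw [← pvDD_iff_infix] at hin
    simp [h] at hin
  · rw [PySem.Chars.isIn_iff_infix]
    exact (pvDD_iff_infix l).mp h

theorem pvReplaceDD_lt (s : String) (h : PySem.Str.isIn "--" s = true) :
    (PySem.Str.replace s "--" "-").toList.length < s.toList.length := by
  have h' : pvDD s.toList = true := by
    rw [← pvIsIn_eq_pvDD]
    simpa [PySem.Str.isIn] using h
  calc (PySem.Str.replace s "--" "-").toList.length
      = (pvStep s.toList).length := by
        simp [PySem.Str.replace, pvReplace_dd]
    _ < s.toList.length := pvStep_length_lt _ h'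

-- while '--' in slug: slug = slug.replace('--', '-')   (hand-ported loop; terminates because
-- each replacement strictly shortens the string, pvReplaceDD_lt)

def pvCollapse (s : String) : String :=
  if h : PySem.Str.isIn "--" s = true then pvCollapse (PySem.Str.replace s "--" "-") else s
termination_by s.toList.length
decreasing_by exact pvReplaceDD_lt s h

-- Port of A: lower, eight .replace passes, the while '--' loop (pvCollapse), strip('-').
def create_manufacturer_slug (manufacturer_name : String) : String :=
  let slug := PySem.Str.lower manufacturer_name
  let slug := PySem.Str.replace slug " " "-"
  let slug := PySem.Str.replace slug "&" "and"
  let slug := PySem.Str.replace slug "." ""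
  let slug := PySem.Str.replace slug "," ""
  let slug := PySem.Str.replace slug "(" ""
  let slug := PySem.Str.replace slug ")" ""
  let slug := PySem.Str.replace slug "/" "-"
  let slug := PySem.Str.replace slug "\\" "-"
  let slug := pvCollapse slug
  PySem.Str.stripChars slug "-"

-- ===== PORT B =====
-- _mapped(ch) of Source B: the per-character substitution.
def pvMapped (ch : Char) : List Char :=
  if ch = ' ' ∨ ch = '/' ∨ ch = '\\' then ['-']
  else if ch = '&' then ['a', 'n', 'd']
  else if ch = '.' ∨ ch = ',' ∨ ch = '(' ∨ ch = ')' then []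
  else [ch]

-- Port of B: one pass over the lowered characters; the inner fold walks the mapped
-- characters and skips a '-' whenever the last emitted character is already '-'.
def create_manufacturer_slug_alt (manufacturer_name : String) : String :=
  let out : List Char := (PySem.Str.lower manufacturer_name).toList.foldl
    (fun out ch => (pvMapped ch).foldl
      (fun out c => if c = '-' ∧ out ≠ [] ∧ out.getLast? = some '-' then out else out ++ [c]) out) []
  PySem.Str.stripChars (String.ofList out) "-"

-- ===== PRECONDITION & SPEC =====
def Spec_create_manufacturer_slug (manufacturer_name : String) (out : String) : Prop := out = create_manufacturer_slug_alt manufacturer_name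
instance (manufacturer_name : String) (out : String) : Decidable (Spec_create_manufacturer_slug manufacturer_name out) := by unfold Spec_create_manufacturer_slug; infer_instance

-- ===== CLAIM (what is proved, stated in full; the proofs are below) =====
def Claim_equal_create_manufacturer_slug : Prop := ∀ (manufacturer_name : String), Dom_create_manufacturer_slug manufacturer_name → Spec_create_manufacturer_slug manufacturer_name (create_manufacturer_slug manufacturer_name)

-- ===== LEMMAS AND PROOFS =====
theorem pvGo_single (p : Char) (new : List Char) :
    ∀ (l : List Char) (fuel : Nat) (acc : List Char), l.length ≤ fuel →
      PySem.Chars.replace.go [p] new fuel l acc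
        = acc.reverse ++ l.flatMap (fun x => if x = p then new else [x]) := by
  intro l
  induction l with
  | nil =>
    intro fuel acc h
    cases fuel <;> simp [PySem.Chars.replace.go]
  | cons c t ih =>
    intro fuel acc h
    cases fuel with
    | zero => simp at h
    | succ n =>
      by_cases hc : c = p
      · subst hc
        simp [PySem.Chars.replace.go, List.isPrefixOf,
          ih n (new.reverse ++ acc) (by simpa using h)]
      · simp [PySem.Chars.replace.go, List.isPrefixOf, hc,
          ih n (c :: acc) (by simpa using h), Ne.symm hc]

theorem pvReplace_single (p : Char) (new : List Char) (l : List Char) :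
    PySem.Chars.replace l [p] new = l.flatMap (fun x => if x = p then new else [x]) := by
  simp [PySem.Chars.replace, pvGo_single p new l l.length [] le_rfl]

def pvDedup (b : Bool) : List Char → List Char
  | [] => []
  | c :: t => if c = '-' then (if b then pvDedup true t else '-' :: pvDedup true t)
              else c :: pvDedup false t

theorem pvDedup_step (l : List Char) : ∀ b, pvDedup b (pvStep l) = pvDedup b l := by
  induction l using pvStep.induct with
  | case1 => intro b; simp [pvStep]
  | case2 c => intro b; simp [pvStep]
  | case3 c d t h ih =>
    obtain ⟨hc, hd⟩ := h
    subst hc; subst hd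
    intro b
    cases b <;> simp [pvStep, pvDedup, ih]
  | case4 c d t h ih =>
    intro b
    simp only [pvStep, if_neg h]
    by_cases hc : c = '-'
    · subst hc
      cases b <;> simp [pvDedup, ih]
    · simp [pvDedup, hc, ih]

theorem pvDedup_eq_self : ∀ l : List Char, pvDD l = false →
    ∀ b : Bool, (b = true → l.head? ≠ some '-') → pvDedup b l = l := by
  intro l
  induction l with
  | nil => intro _ b _; simp [pvDedup]
  | cons c t ih =>
    intro hdd b hb
    have hddt : pvDD t = false := by
      cases t with
      | nil => simp [pvDD]
      | cons d t' =>
        simp only [pvDD, Bool.or_eq_false_iff] at hdd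
        exact hdd.2
    by_cases hc : c = '-'
    · subst hc
      have hb' : b = false := by
        cases b
        · rfl
        · exact absurd rfl (fun h => hb h rfl)
      have hh : t.head? ≠ some '-' := by
        cases t with
        | nil => simp
        | cons d t' =>
          simp only [pvDD, Bool.or_eq_false_iff, decide_eq_false_iff_not] at hdd
          simp only [List.head?_cons, ne_eq, Option.some.injEq]
          intro hd
          exact hdd.1 ⟨trivial, hd⟩
      subst hb'
      simp [pvDedup, ih hddt true (fun _ => hh)]
    · simp only [pvDedup, if_neg hc]
      rw [ih hddt false (by simp)]

theorem pvCollapse_toList (s : String) : (pvCollapse s).toList = pvDedup false s.toList := by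
  induction s using pvCollapse.induct with
  | case1 s h ih =>
    rw [pvCollapse, dif_pos h, ih]
    have : (PySem.Str.replace s "--" "-").toList = pvStep s.toList := by
      simp [PySem.Str.replace, pvReplace_dd]
    rw [this, pvDedup_step]
  | case2 s h =>
    rw [pvCollapse, dif_neg h]
    have hdd : pvDD s.toList = false := by
      rw [← pvIsIn_eq_pvDD]
      simp only [Bool.not_eq_true] at h
      simpa [PySem.Str.isIn] using h
    exact (pvDedup_eq_self s.toList hdd false (by simp)).symm

theorem pvInner (cs : List Char) : ∀ acc : List Char,
    cs.foldl (fun out c => if c = '-' ∧ out ≠ [] ∧ out.getLast? = some '-' then out else out ++ [c]) acc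
      = acc ++ pvDedup (decide (acc.getLast? = some '-')) cs := by
  induction cs with
  | nil => intro acc; simp [pvDedup]
  | cons c cs ih =>
    intro acc
    by_cases hc : c = '-'
    · subst hc
      by_cases hl : acc.getLast? = some '-'
      · have hne : acc ≠ [] := by intro h; subst h; simp at hl
        rw [List.foldl_cons, if_pos ⟨rfl, hne, hl⟩, ih acc]
        simp [pvDedup, hl]
      · rw [List.foldl_cons, if_neg (by tauto), ih (acc ++ ['-'])]
        simp [pvDedup, hl, List.append_assoc]
    · rw [List.foldl_cons, if_neg (by tauto), ih (acc ++ [c])]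
      simp [pvDedup, hc, List.append_assoc]

def pvLastD (b : Bool) : List Char → Bool
  | [] => b
  | c :: t => pvLastD (decide (c = '-')) t

theorem pvDedup_append : ∀ (xs : List Char) (b : Bool) (ys : List Char),
    pvDedup b (xs ++ ys) = pvDedup b xs ++ pvDedup (pvLastD b xs) ys := by
  intro xs
  induction xs with
  | nil => intro b ys; simp [pvDedup, pvLastD]
  | cons c xs ih =>
    intro b ys
    by_cases hc : c = '-'
    · subst hc
      cases b <;> simp [pvDedup, pvLastD, ih]
    · simp [pvDedup, pvLastD, hc, ih]

theorem pvLast_after : ∀ (xs : List Char) (b : Bool) (acc : List Char),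
    b = decide (acc.getLast? = some '-') →
    decide ((acc ++ pvDedup b xs).getLast? = some '-') = pvLastD b xs := by
  intro xs
  induction xs with
  | nil => intro b acc hb; simp [pvDedup, pvLastD, hb]
  | cons c xs ih =>
    intro b acc hb
    by_cases hc : c = '-'
    · subst hc
      cases b with
      | true =>
        have e1 : pvDedup true ('-' :: xs) = pvDedup true xs := by simp [pvDedup]
        have e2 : pvLastD true ('-' :: xs) = pvLastD true xs := by simp [pvLastD]
        rw [e1, e2]
        exact ih true acc hb
      | false =>
        have e1 : pvDedup false ('-' :: xs) = '-' :: pvDedup true xs := by simp [pvDedup]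
        have e2 : pvLastD false ('-' :: xs) = pvLastD true xs := by simp [pvLastD]
        rw [e1, e2, show acc ++ '-' :: pvDedup true xs = (acc ++ ['-']) ++ pvDedup true xs by simp]
        exact ih true (acc ++ ['-']) (by simp)
    · have e1 : pvDedup b (c :: xs) = c :: pvDedup false xs := by
        cases b <;> simp [pvDedup, hc]
      have e2 : pvLastD b (c :: xs) = pvLastD false xs := by simp [pvLastD, hc]
      rw [e1, e2, show acc ++ c :: pvDedup false xs = (acc ++ [c]) ++ pvDedup false xs by simp]
      exact ih false (acc ++ [c]) (by simp [hc])

theorem pvOuter : ∀ (l : List Char) (acc : List Char),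
    l.foldl (fun out ch => (pvMapped ch).foldl
        (fun out c => if c = '-' ∧ out ≠ [] ∧ out.getLast? = some '-' then out else out ++ [c]) out) acc
      = acc ++ pvDedup (decide (acc.getLast? = some '-')) (l.flatMap pvMapped) := by
  intro l
  induction l with
  | nil => intro acc; simp [pvDedup]
  | cons ch l ih =>
    intro acc
    rw [List.foldl_cons, pvInner, ih, List.flatMap_cons, pvDedup_append,
      pvLast_after (pvMapped ch) _ acc rfl, List.append_assoc]

theorem pvChain (l : List Char) :
    PySem.Chars.replace (PySem.Chars.replace (PySem.Chars.replace (PySem.Chars.replace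
      (PySem.Chars.replace (PySem.Chars.replace (PySem.Chars.replace (PySem.Chars.replace
        l [' '] ['-']) ['&'] ['a', 'n', 'd']) ['.'] []) [','] []) ['('] []) [')'] [])
      ['/'] ['-']) ['\\'] ['-'] = l.flatMap pvMapped := by
  simp only [pvReplace_single, List.flatMap_assoc]
  induction l with
  | nil => simp
  | cons c l ih =>
    rw [List.flatMap_cons, List.flatMap_cons, ih]
    congr 1
    by_cases h1 : c = ' '
    · subst h1; rfl
    by_cases h2 : c = '&'
    · subst h2; rfl
    by_cases h3 : c = '.'
    · subst h3; rfl
    by_cases h4 : c = ','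
    · subst h4; rfl
    by_cases h5 : c = '('
    · subst h5; rfl
    by_cases h6 : c = ')'
    · subst h6; rfl
    by_cases h7 : c = '/'
    · subst h7; rfl
    by_cases h8 : c = '\\'
    · subst h8; rfl
    simp [pvMapped, h1, h2, h3, h4, h5, h6, h7, h8]

theorem pvStrReplace_toList (s o n : String) :
    (PySem.Str.replace s o n).toList = PySem.Chars.replace s.toList o.toList n.toList := by
  simp [PySem.Str.replace]

theorem pvMain (m : String) : create_manufacturer_slug m = create_manufacturer_slug_alt m := by
  unfold create_manufacturer_slug create_manufacturer_slug_alt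
  rw [pvOuter _ []]
  have hkey : (pvCollapse (PySem.Str.replace (PySem.Str.replace (PySem.Str.replace
      (PySem.Str.replace (PySem.Str.replace (PySem.Str.replace (PySem.Str.replace
        (PySem.Str.replace (PySem.Str.lower m) " " "-") "&" "and") "." "") "," "")
        "(" "") ")" "") "/" "-") "\\" "-")).toList
      = [] ++ pvDedup (decide (([] : List Char).getLast? = some '-'))
          ((PySem.Str.lower m).toList.flatMap pvMapped) := by
    rw [pvCollapse_toList]
    simp only [pvStrReplace_toList, PySem.Str.toList_lower]
    rw [show ("-" : String).toList = ['-'] from rfl, show (" " : String).toList = [' '] from rfl,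
      show ("&" : String).toList = ['&'] from rfl, show ("and" : String).toList = ['a','n','d'] from rfl,
      show ("." : String).toList = ['.'] from rfl, show ("," : String).toList = [','] from rfl,
      show ("(" : String).toList = ['('] from rfl, show (")" : String).toList = [')'] from rfl,
      show ("/" : String).toList = ['/'] from rfl, show ("\\" : String).toList = ['\\'] from rfl,
      show ("" : String).toList = [] from rfl]
    rw [pvChain]
    simp
  simp only [PySem.Str.stripChars, String.toList_ofList]
  rw [hkey]

-- ===== VERDICT (by name: the statement is the Claim_ definition above) =====
theorem create_manufacturer_slug_spec : Claim_equal_create_manufacturer_slug := by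
  intro m _
  unfold Spec_create_manufacturer_slug
  exact pvMain m
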